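-- pv_equiv track=rewrite | github.com/uds-lsv/StereoKG | data_processing/question_to_statement.py | _correct_tokens
-- ===== SOURCE A (Python) =====
-- def _correct_tokens(tokens, pos):
--     merge_next = False
--     res_tokens = []
--     res_pos = []
--     for i in range(len(tokens)):
--         if tokens[i] == "-" and res_tokens:
--             res_tokens[-1] = res_tokens[-1] + "-"
--             res_pos[-1] = (res_pos[-1][0] + "-", res_pos[-1][1])
--             merge_next = True
--         elif merge_next:
--             merge_next = False
--             res_tokens[-1] = res_tokens[-1] + tokens[i]
--             res_pos[-1] = (res_pos[-1][0] + pos[i][0], pos[i][1])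
--         else:
--             res_tokens.append(tokens[i])
--             res_pos.append(pos[i])
--     return res_tokens, res_pos
-- ===== SOURCE B (Python) =====
-- def _correct_tokens(tokens, pos):
--     # Builds each output entry to completion with a nested hyphen-absorbing loop,
--     # instead of A's carried merge_next flag and mutation of the last list element.
--     n = len(tokens)
--     res_tokens = []
--     res_pos = []
--     i = 0
--     while i < n:
--         word = tokens[i]
--         wp, wt = pos[i]
--         i += 1
--         while i < n and tokens[i] == "-":
--             word += "-"
--             wp += "-"
--             i += 1
--             if i < n and tokens[i] != "-":
--                 word += tokens[i]
--                 wp += pos[i][0]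
--                 wt = pos[i][1]
--                 i += 1
--         res_tokens.append(word)
--         res_pos.append((wp, wt))
--     return res_tokens, res_pos
-- ===== Notes on version B (the rewrite author's own statement) =====
-- stated objective: alternative
-- what changed: B discards A's carried merge_next flag and last-element mutation: a nested loop builds each hyphen-merged entry to completion in local string accumulators (absorbing runs of hyphens and the token after each run) and appends the finished entry once.
import Mathlib
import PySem

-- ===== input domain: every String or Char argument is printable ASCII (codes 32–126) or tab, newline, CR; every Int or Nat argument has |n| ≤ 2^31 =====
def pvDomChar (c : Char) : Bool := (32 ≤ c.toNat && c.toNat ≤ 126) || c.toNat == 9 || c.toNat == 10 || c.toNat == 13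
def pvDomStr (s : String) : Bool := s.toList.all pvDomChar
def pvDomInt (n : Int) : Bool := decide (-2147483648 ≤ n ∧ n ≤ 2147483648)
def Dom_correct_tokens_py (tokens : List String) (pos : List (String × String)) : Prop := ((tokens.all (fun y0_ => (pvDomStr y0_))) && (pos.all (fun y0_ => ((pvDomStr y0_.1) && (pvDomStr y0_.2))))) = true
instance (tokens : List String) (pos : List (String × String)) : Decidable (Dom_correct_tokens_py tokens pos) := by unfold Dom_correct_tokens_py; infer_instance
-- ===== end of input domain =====

-- B drops A's carried merge_next flag and its mutation of the last list element: a nested loop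
-- builds each hyphen-merged entry to completion in local string accumulators and appends it once.

-- ===== PORT A =====
-- One iteration of A's for-loop body; state = (merge_next, res_tokens, res_pos),
-- `none` = an IndexError on pos[i] has occurred (excluded by Pre_).
-- tokens.getD i "" is exact for tokens[i]: i ranges over range(len(tokens)).
def ctpStep (tokens : List String) (pos : List (String × String))
    (st : Option (Bool × List String × List (String × String))) (i : Nat) :
    Option (Bool × List String × List (String × String)) :=
  match st with
  | none => none
  | some (merge_next, res_tokens, res_pos) =>
    if tokens.getD i "" = "-" ∧ res_tokens ≠ [] then
      some (true,
            res_tokens.dropLast ++ [res_tokens.getLastD "" ++ "-"],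
            res_pos.dropLast ++ [((res_pos.getLastD ("", "")).1 ++ "-", (res_pos.getLastD ("", "")).2)])
    else if merge_next then
      match pos[i]? with
      | none => none
      | some p =>
          some (false,
                res_tokens.dropLast ++ [res_tokens.getLastD "" ++ tokens.getD i ""],
                res_pos.dropLast ++ [((res_pos.getLastD ("", "")).1 ++ p.1, p.2)])
    else
      match pos[i]? with
      | none => none
      | some p => some (merge_next, res_tokens ++ [tokens.getD i ""], res_pos ++ [p])

def correct_tokens_py (tokens : List String) (pos : List (String × String)) :
    List String × (List (String × String)) :=
  match (List.range tokens.length).foldl (ctpStep tokens pos) (some (false, [], [])) with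
  | some (_, res_tokens, res_pos) => (res_tokens, res_pos)
  | none => ([], [])  -- unreachable under Pre_ (Python raises IndexError there)

-- ===== PORT B =====
-- B's inner loop, with a fuel counter making the structural recursion total: when called with
-- fuel ≥ tokens.length - i the fuel never runs out before the loop condition fails, and the
-- fuel-0 exit returns exactly the loop-exit value.  It absorbs a hyphen and, right after it,
-- the following non-hyphen token (if any) into the entry (word, wp, wt) being built, repeats
-- while a hyphen follows, and returns the finished entry with the next index.
-- `none` = IndexError on pos (excluded by Pre_).
def ctbHy (tokens : List String) (pos : List (String × String)) :
    Nat → Nat → String → String → String → Option (String × String × String × Nat)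
  | 0, i, word, wp, wt => some (word, wp, wt, i)
  | fuel + 1, i, word, wp, wt =>
    if i < tokens.length ∧ tokens.getD i "" = "-" then
      let word1 := word ++ "-"
      let wp1 := wp ++ "-"
      if i + 1 < tokens.length ∧ tokens.getD (i + 1) "" ≠ "-" then
        match pos[i + 1]? with
        | none => none
        | some p => ctbHy tokens pos fuel (i + 2) (word1 ++ tokens.getD (i + 1) "") (wp1 ++ p.1) p.2
      else ctbHy tokens pos fuel (i + 1) word1 wp1 wt
    else some (word, wp, wt, i)

-- B's outer loop (same fuel discipline): start a fresh entry from tokens[i]/pos[i], let ctbHy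
-- complete it, append it once, continue at the returned index.
def ctbGo (tokens : List String) (pos : List (String × String)) :
    Nat → Nat → List String → List (String × String) → Option (List String × (List (String × String)))
  | 0, _, rt, rp => some (rt, rp)
  | fuel + 1, i, rt, rp =>
    if i < tokens.length then
      match pos[i]? with
      | none => none
      | some p =>
        match ctbHy tokens pos fuel (i + 1) (tokens.getD i "") p.1 p.2 with
        | none => none
        | some (w, a, b, j) => ctbGo tokens pos fuel j (rt ++ [w]) (rp ++ [(a, b)])
    else some (rt, rp)

def correct_tokens_py_alt (tokens : List String) (pos : List (String × String)) :
    List String × (List (String × String)) :=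
  match ctbGo tokens pos tokens.length 0 [] [] with
  | some r => r
  | none => ([], [])  -- unreachable under Pre_ (Python raises IndexError there)

-- ===== PRECONDITION & SPEC =====
-- Pre_ excludes exactly the inputs where Python A raises IndexError: pos[i] is read at every
-- i with i = 0 or tokens[i] ≠ "-", so all those indices must be within pos.
def Pre_correct_tokens_py (tokens : List String) (pos : List (String × String)) : Prop :=
  ∀ i, i < tokens.length → (i = 0 ∨ tokens.getD i "" ≠ "-") → i < pos.length
instance (tokens : List String) (pos : List (String × String)) : Decidable (Pre_correct_tokens_py tokens pos) := by unfold Pre_correct_tokens_py; infer_instance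

def pvWitness_correct_tokens_py : List String × (List (String × String)) :=
  (["well", "-", "known", "fact"], [("well", "JJ"), ("-", "HYPH"), ("known", "VBN"), ("fact", "NN")])

def Spec_correct_tokens_py (tokens : List String) (pos : List (String × String)) (out : List String × (List (String × String))) : Prop := out = correct_tokens_py_alt tokens pos
instance (tokens : List String) (pos : List (String × String)) (out : List String × (List (String × String))) : Decidable (Spec_correct_tokens_py tokens pos out) := by unfold Spec_correct_tokens_py; infer_instance

-- ===== CLAIM (what is proved, stated in full; the proofs are below) =====
def Claim_equal_correct_tokens_py : Prop := ∀ (tokens : List String) (pos : List (String × String)), Dom_correct_tokens_py tokens pos → Pre_correct_tokens_py tokens pos → Spec_correct_tokens_py tokens pos (correct_tokens_py tokens pos)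

-- ===== LEMMAS AND PROOFS =====

theorem ctp_foldl_none (tokens : List String) (pos : List (String × String)) :
    ∀ l : List Nat, l.foldl (ctpStep tokens pos) none = none := by
  intro l; induction l with
  | nil => rfl
  | cons a l ih => simpa [ctpStep] using ih

-- the inner loop never moves the index backwards
theorem ctbHy_ge (tokens : List String) (pos : List (String × String)) :
    ∀ (k i : Nat) (word wp wt : String) (r : String × String × String × Nat),
      ctbHy tokens pos k i word wp wt = some r → i ≤ r.2.2.2 := by
  intro k
  induction k with
  | zero => intro i word wp wt r h; cases h; simp
  | succ k ih =>
    intro i word wp wt r h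
    rw [ctbHy] at h
    by_cases hi : i < tokens.length ∧ tokens.getD i "" = "-"
    · rw [if_pos hi] at h
      simp only at h
      by_cases h2 : i + 1 < tokens.length ∧ tokens.getD (i + 1) "" ≠ "-"
      · rw [if_pos h2] at h
        cases hp : pos[i + 1]? with
        | none => rw [hp] at h; cases h
        | some p => rw [hp] at h; have := ih (i + 2) _ _ _ r h; omega
      · rw [if_neg h2] at h
        have := ih (i + 1) _ _ _ r h; omega
    · rw [if_neg hi] at h
      cases h; simp

-- congruence for the Option-match both loops produce
def optMatch4 {α : Type} (E : Option (String × String × String × Nat))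
    (f : String → String → String → Nat → Option α) : Option α :=
  match E with | none => none | some (w, a, b, j) => f w a b j

theorem optMatch_congr4 {α : Type} (E : Option (String × String × String × Nat))
    (f g : String → String → String → Nat → Option α)
    (hfg : ∀ w a b j, E = some (w, a, b, j) → f w a b j = g w a b j) :
    optMatch4 E f = optMatch4 E g := by
  cases E with
  | none => rfl
  | some r => obtain ⟨w, a, b, j⟩ := r; exact hfg w a b j rfl

-- with enough fuel for the remaining tokens, one more unit of fuel changes nothing
theorem ctbHy_fuel (tokens : List String) (pos : List (String × String)) :
    ∀ (k i : Nat) (word wp wt : String), tokens.length - i ≤ k →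
      ctbHy tokens pos (k + 1) i word wp wt = ctbHy tokens pos k i word wp wt := by
  intro k
  induction k with
  | zero =>
    intro i word wp wt hk
    have hi2 : ¬ i < tokens.length := by omega
    simp [ctbHy, hi2]
  | succ k ih =>
    intro i word wp wt hk
    by_cases hi : i < tokens.length ∧ tokens.getD i "" = "-"
    · rw [ctbHy, if_pos hi]
      conv_rhs => rw [ctbHy, if_pos hi]
      simp only
      by_cases h2 : i + 1 < tokens.length ∧ tokens.getD (i + 1) "" ≠ "-"
      · rw [if_pos h2, if_pos h2]
        cases hp : pos[i + 1]? with
        | none => rfl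
        | some p => exact ih (i + 2) _ _ _ (by omega)
      · rw [if_neg h2, if_neg h2]
        exact ih (i + 1) _ _ _ (by omega)
    · rw [ctbHy, if_neg hi]
      conv_rhs => rw [ctbHy, if_neg hi]

theorem ctbGo_fuel (tokens : List String) (pos : List (String × String)) :
    ∀ (k i : Nat) (rt : List String) (rp : List (String × String)), tokens.length - i ≤ k →
      ctbGo tokens pos (k + 1) i rt rp = ctbGo tokens pos k i rt rp := by
  intro k
  induction k with
  | zero =>
    intro i rt rp hk
    have hi : ¬ i < tokens.length := by omega
    simp [ctbGo, hi]
  | succ k ih =>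
    intro i rt rp hk
    by_cases hi : i < tokens.length
    · rw [ctbGo, if_pos hi]
      conv_rhs => rw [ctbGo, if_pos hi]
      cases hp : pos[i]? with
      | none => rfl
      | some p =>
        simp only
        rw [ctbHy_fuel tokens pos k (i + 1) _ _ _ (by omega)]
        exact optMatch_congr4 (ctbHy tokens pos k (i + 1) (tokens.getD i "") p.1 p.2)
          (fun w a b j => ctbGo tokens pos (k + 1) j (rt ++ [w]) (rp ++ [(a, b)]))
          (fun w a b j => ctbGo tokens pos k j (rt ++ [w]) (rp ++ [(a, b)]))
          (fun w a b j hc => by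
            have hj := ctbHy_ge tokens pos k (i + 1) _ _ _ _ hc
            simp only at hj
            exact ih j _ _ (by omega))
    · rw [ctbGo, if_neg hi, ctbGo, if_neg hi]

-- Correspondence, proved by one fuel induction over both loop shapes:
-- Outer: A's fold from i in state (false, rt, rp), provided rt = [] or tokens[i] ≠ "-",
--        equals B's outer loop ctbGo from i (with fuel ≥ remaining tokens).
-- Inner: A's fold from i in state (m, rt ++ [word], rp ++ [(wp, wt)]), where m may be true
--        only if the loop is over or tokens[i] = "-", equals B's inner loop ctbHy finishing
--        the pending entry, followed by ctbGo.
theorem ct_main (tokens : List String) (pos : List (String × String)) :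
    ∀ k : Nat,
      (∀ (i : Nat) (rt : List String) (rp : List (String × String)),
        tokens.length - i ≤ k → (rt = [] ∨ tokens.getD i "" ≠ "-") →
        ((List.range' i (tokens.length - i)).foldl (ctpStep tokens pos) (some (false, rt, rp))).map
            (fun s => (s.2.1, s.2.2))
          = ctbGo tokens pos k i rt rp)
      ∧
      (∀ (i : Nat) (word wp wt : String) (rt : List String) (rp : List (String × String)) (m : Bool),
        tokens.length - i ≤ k → (m = true → tokens.length ≤ i ∨ tokens.getD i "" = "-") →
        ((List.range' i (tokens.length - i)).foldl (ctpStep tokens pos)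
            (some (m, rt ++ [word], rp ++ [(wp, wt)]))).map (fun s => (s.2.1, s.2.2))
          = match ctbHy tokens pos k i word wp wt with
            | none => none
            | some (w, a, b, j) => ctbGo tokens pos k j (rt ++ [w]) (rp ++ [(a, b)])) := by
  intro k
  induction k with
  | zero =>
    constructor
    · intro i rt rp hk _
      have h0 : tokens.length - i = 0 := by omega
      rw [h0]; rfl
    · intro i word wp wt rt rp m hk _
      have h0 : tokens.length - i = 0 := by omega
      rw [h0]; rfl
  | succ k ih =>
    have hO : ∀ (i : Nat) (rt : List String) (rp : List (String × String)),
        tokens.length - i ≤ k + 1 → (rt = [] ∨ tokens.getD i "" ≠ "-") →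
        ((List.range' i (tokens.length - i)).foldl (ctpStep tokens pos) (some (false, rt, rp))).map
            (fun s => (s.2.1, s.2.2))
          = ctbGo tokens pos (k + 1) i rt rp := by
      intro i rt rp hk hside
      by_cases hi : i < tokens.length
      · have hpeel : tokens.length - i = (tokens.length - (i + 1)) + 1 := by omega
        have hb1 : ¬ (tokens.getD i "" = "-" ∧ rt ≠ []) := by
          rcases hside with h | h
          · intro hc; exact hc.2 h
          · intro hc; exact h hc.1
        rw [hpeel, List.range'_succ, List.foldl_cons, ctbGo, if_pos hi]
        have hstep : ctpStep tokens pos (some (false, rt, rp)) i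
            = match pos[i]? with
              | none => none
              | some p => some (false, rt ++ [tokens.getD i ""], rp ++ [p]) := by
          simp only [ctpStep]; rw [if_neg hb1]; rfl
        rw [hstep]
        cases hp : pos[i]? with
        | none => simp [ctp_foldl_none]
        | some p =>
          have := ih.2 (i + 1) (tokens.getD i "") p.1 p.2 rt rp false (by omega) (by simp)
          simpa using this
      · have h0 : tokens.length - i = 0 := by omega
        simp [ctbGo, hi, h0]
    refine ⟨hO, ?_⟩
    intro i word wp wt rt rp m hk hm
    by_cases hhy : i < tokens.length ∧ tokens.getD i "" = "-"
    · -- hyphen: A appends "-" to the last entry; B appends "-" to its accumulators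
      have hpeel : tokens.length - i = (tokens.length - (i + 1)) + 1 := by omega
      have hstep : ctpStep tokens pos (some (m, rt ++ [word], rp ++ [(wp, wt)])) i
          = some (true, rt ++ [word ++ "-"], rp ++ [(wp ++ "-", wt)]) := by
        simp only [ctpStep]
        rw [if_pos ⟨hhy.2, by simp⟩]
        simp
      rw [hpeel, List.range'_succ, List.foldl_cons, hstep, ctbHy, if_pos hhy]
      simp only
      by_cases h2 : i + 1 < tokens.length ∧ tokens.getD (i + 1) "" ≠ "-"
      · -- the hyphen merges the following token into the same entry
        have hpeel2 : tokens.length - (i + 1) = (tokens.length - (i + 2)) + 1 := by omega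
        rw [if_pos h2, hpeel2, List.range'_succ, List.foldl_cons]
        have hstep2 : ctpStep tokens pos (some (true, rt ++ [word ++ "-"], rp ++ [(wp ++ "-", wt)])) (i + 1)
            = match pos[i + 1]? with
              | none => none
              | some p => some (false, rt ++ [(word ++ "-") ++ tokens.getD (i + 1) ""],
                                rp ++ [((wp ++ "-") ++ p.1, p.2)]) := by
          simp only [ctpStep]
          rw [if_neg (fun hc => h2.2 hc.1), if_pos trivial]
          simp
        rw [hstep2]
        cases hp : pos[i + 1]? with
        | none => simp [ctp_foldl_none]
        | some p =>
          simp only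
          have hih := ih.2 (i + 2) ((word ++ "-") ++ tokens.getD (i + 1) "") ((wp ++ "-") ++ p.1) p.2
              rt rp false (by omega) (by simp)
          rw [hih]
          exact optMatch_congr4
            (ctbHy tokens pos k (i + 2) ((word ++ "-") ++ tokens.getD (i + 1) "") ((wp ++ "-") ++ p.1) p.2)
            (fun w a b j => ctbGo tokens pos k j (rt ++ [w]) (rp ++ [(a, b)]))
            (fun w a b j => ctbGo tokens pos (k + 1) j (rt ++ [w]) (rp ++ [(a, b)]))
            (fun w a b j hc => by
              have hj := ctbHy_ge tokens pos k (i + 2) _ _ _ _ hc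
              simp only at hj
              exact (ctbGo_fuel tokens pos k j _ _ (by omega)).symm)
      · -- next token is another hyphen or the end: stay in the inner loop
        rw [if_neg h2]
        have hih := ih.2 (i + 1) (word ++ "-") (wp ++ "-") wt rt rp true (by omega)
            (by intro _
                by_cases hn : i + 1 < tokens.length
                · right; by_contra hne; exact h2 ⟨hn, hne⟩
                · left; omega)
        rw [hih]
        exact optMatch_congr4
          (ctbHy tokens pos k (i + 1) (word ++ "-") (wp ++ "-") wt)
          (fun w a b j => ctbGo tokens pos k j (rt ++ [w]) (rp ++ [(a, b)]))
          (fun w a b j => ctbGo tokens pos (k + 1) j (rt ++ [w]) (rp ++ [(a, b)]))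
          (fun w a b j hc => by
            have hj := ctbHy_ge tokens pos k (i + 1) _ _ _ _ hc
            simp only at hj
            exact (ctbGo_fuel tokens pos k j _ _ (by omega)).symm)
    · -- entry complete: flush it and restart the outer loop at i
      have hend : ctbHy tokens pos (k + 1) i word wp wt = some (word, wp, wt, i) := by
        rw [ctbHy, if_neg hhy]
      rw [hend]
      by_cases hi : i < tokens.length
      · have htok : tokens.getD i "" ≠ "-" := fun hc => hhy ⟨hi, hc⟩
        have hmf : m = false := by
          cases m with
          | false => rfl
          | true =>
            rcases hm rfl with h | h
            · omega
            · exact absurd h htok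
        subst hmf
        exact hO i (rt ++ [word]) (rp ++ [(wp, wt)]) hk (Or.inr htok)
      · have h0 : tokens.length - i = 0 := by omega
        simp [ctbGo, hi, h0]

-- ===== VERDICT (by name: the statement is the Claim_ definition above) =====
theorem correct_tokens_py_spec : Claim_equal_correct_tokens_py := by
  intro tokens pos _hdom _hpre
  unfold Spec_correct_tokens_py correct_tokens_py correct_tokens_py_alt
  have h := (ct_main tokens pos tokens.length).1 0 [] [] (by omega) (Or.inl rfl)
  rw [Nat.sub_zero, ← List.range_eq_range'] at h
  cases hfold : (List.range tokens.length).foldl (ctpStep tokens pos) (some (false, [], [])) with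
  | none => rw [hfold] at h; simp at h; rw [← h]
  | some s => rw [hfold] at h; simp at h; rw [← h]
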